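-- pv_equiv track=rewrite | github.com/kiraskywing/Code_Practice | CodeSignal/string-split-concate.py | solution
-- ===== SOURCE A (Python) =====
-- def solution(s):
--     n = len(s)
--     res = 0
--     for i in range(1, n - 1):
--         a = s[0:i]
--         for j in range(i + 1, n):
--             b = s[i:j]
--             c = s[j:n]
--             res += (a + b != b + c) and (b + c != c + a) and (a + b != c + a)
--
--     return res
-- ===== SOURCE B (Python) =====
-- def solution(s):
--     # For each split point i, almost every j gives three pairwise-distinct
--     # concatenations: an equality forces a length match, which pins j to one of
--     # at most three candidate values.  So count all j and subtract the few bad ones.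
--     n = len(s)
--     res = 0
--     for i in range(1, n - 1):
--         cands = {n - i, 2 * i}
--         if (n + i) % 2 == 0:
--             cands.add((n + i) // 2)
--         bad = 0
--         for j in cands:
--             if i < j < n and (s[:j] == s[i:] or s[i:] == s[j:] + s[:i] or s[:j] == s[j:] + s[:i]):
--                 bad += 1
--         res += (n - 1 - i) - bad
--     return res
-- ===== Notes on version B (the rewrite author's own statement) =====
-- stated objective: faster
-- what changed: Instead of testing all O(n^2) split pairs by building the three concatenations (O(n) each), B counts every pair as good and subtracts, per i, the at-most-three candidate j values (j=n-i, j=2i, j=(n+i)/2) where a length match makes an equality possible, checking only those by direct slice comparison.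
import Mathlib
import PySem

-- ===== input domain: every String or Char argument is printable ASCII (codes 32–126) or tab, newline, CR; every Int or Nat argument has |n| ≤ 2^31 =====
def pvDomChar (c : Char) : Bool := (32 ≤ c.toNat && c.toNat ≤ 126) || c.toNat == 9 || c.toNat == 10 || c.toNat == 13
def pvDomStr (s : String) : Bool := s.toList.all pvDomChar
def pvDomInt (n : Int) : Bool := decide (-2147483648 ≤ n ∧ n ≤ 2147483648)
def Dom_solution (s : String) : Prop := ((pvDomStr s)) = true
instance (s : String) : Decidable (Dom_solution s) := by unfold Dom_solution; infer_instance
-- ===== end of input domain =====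

-- B replaces A's inner scan over all j (rebuilding three concatenations per pair) by at most
-- three length-pinned candidate checks per i; measured faster (asymptotic change).

-- ===== PORT A =====
def solution (s : String) : Int :=
  let t := s.toList
  let n : Int := (t.length : Int)
  (PySem.List.pyRange 1 (n - 1) 1).foldl (fun res i =>
    let a := PySem.List.slice t (some 0) (some i)
    (PySem.List.pyRange (i + 1) n 1).foldl (fun res j =>
      let b := PySem.List.slice t (some i) (some j)
      let c := PySem.List.slice t (some j) (some n)
      res + (if (a ++ b ≠ b ++ c) ∧ (b ++ c ≠ c ++ a) ∧ (a ++ b ≠ c ++ a) then 1 else 0)) res) 0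

-- ===== PORT B =====
def solution_alt (s : String) : Int :=
  let t := s.toList
  let n : Int := (t.length : Int)
  (PySem.List.pyRange 1 (n - 1) 1).foldl (fun res i =>
    let cands : PySem.Set Int := PySem.Set.ofList [n - i, 2 * i]
    let cands := if PySem.Int.mod (n + i) 2 = 0 then
        PySem.Set.add cands (PySem.Int.floordiv (n + i) 2) else cands
    let bad : Int := cands.foldl (fun bad j =>
      if i < j ∧ j < n ∧
          (PySem.List.slice t none (some j) = PySem.List.slice t (some i) none
           ∨ PySem.List.slice t (some i) none
               = PySem.List.slice t (some j) none ++ PySem.List.slice t none (some i)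
           ∨ PySem.List.slice t none (some j)
               = PySem.List.slice t (some j) none ++ PySem.List.slice t none (some i))
        then bad + 1 else bad) 0
    res + (n - 1 - i) - bad) 0

-- ===== PRECONDITION & SPEC =====
def Spec_solution (s : String) (out : Int) : Prop := out = solution_alt s
instance (s : String) (out : Int) : Decidable (Spec_solution s out) := by unfold Spec_solution; infer_instance

-- ===== CLAIM (what is proved, stated in full; the proofs are below) =====
def Claim_equal_solution : Prop := ∀ (s : String), Dom_solution s → Spec_solution s (solution s)

-- ===== LEMMAS AND PROOFS =====

lemma pv_slice_ab (t : List Char) (i j : Int) (h0 : 0 ≤ i) (hij : i ≤ j) :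
    PySem.List.slice t (some 0) (some i) ++ PySem.List.slice t (some i) (some j)
      = PySem.List.slice t none (some j) := by
  rw [PySem.List.slice_zero_start, PySem.List.slice_to _ h0,
      PySem.List.slice_to _ (le_trans h0 hij), PySem.List.slice_toNat _ h0 (le_trans h0 hij)]
  have h : j.toNat = i.toNat + (j.toNat - i.toNat) := by omega
  rw [h, List.take_add]
  have h2 : i.toNat + (j.toNat - i.toNat) - i.toNat = j.toNat - i.toNat := by omega
  rw [h2]

lemma pv_slice_bc (t : List Char) (i j : Int) (h0 : 0 ≤ i) (hij : i ≤ j) :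
    PySem.List.slice t (some i) (some j) ++ PySem.List.slice t (some j) (some (t.length : Int))
      = PySem.List.slice t (some i) none := by
  rw [PySem.List.slice_toNat _ h0 (le_trans h0 hij),
      PySem.List.slice_toNat _ (le_trans h0 hij) (Int.natCast_nonneg _),
      PySem.List.slice_from _ h0]
  have hc : (t.drop j.toNat).take ((t.length : Int).toNat - j.toNat) = t.drop j.toNat :=
    List.take_of_length_le (by simp)
  rw [hc]
  have h : t.drop j.toNat = (t.drop i.toNat).drop (j.toNat - i.toNat) := by
    rw [List.drop_drop]; congr 1; omega
  rw [h, List.take_append_drop]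

lemma pv_slice_c (t : List Char) (j : Int) (h0 : 0 ≤ j) :
    PySem.List.slice t (some j) (some (t.length : Int)) = PySem.List.slice t (some j) none := by
  rw [PySem.List.slice_toNat _ h0 (Int.natCast_nonneg _), PySem.List.slice_from _ h0]
  exact List.take_of_length_le (by simp)

-- an equality forces a length match, which pins j to a candidate value
lemma pv_chk_pins (t : List Char) (i j : Int) (h1 : 1 ≤ i) (hij : i < j)
    (hj : j < (t.length : Int))
    (h : (PySem.List.slice t none (some j) = PySem.List.slice t (some i) none
      ∨ PySem.List.slice t (some i) none
          = PySem.List.slice t (some j) none ++ PySem.List.slice t none (some i)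
      ∨ PySem.List.slice t none (some j)
          = PySem.List.slice t (some j) none ++ PySem.List.slice t none (some i))) :
    j = (t.length : Int) - i ∨ j = 2 * i ∨
      (PySem.Int.mod ((t.length : Int) + i) 2 = 0 ∧
        j = PySem.Int.floordiv ((t.length : Int) + i) 2) := by
  have h0i : (0:Int) ≤ i := by omega
  have h0j : (0:Int) ≤ j := by omega
  rw [PySem.List.slice_to _ h0j, PySem.List.slice_to _ h0i,
      PySem.List.slice_from _ h0i, PySem.List.slice_from _ h0j] at h
  rcases h with h | h | h
  · left
    have := congrArg List.length h
    simp [List.length_take, List.length_drop] at this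
    omega
  · right; left
    have := congrArg List.length h
    simp [List.length_take, List.length_drop] at this
    omega
  · right; right
    have hl := congrArg List.length h
    simp [List.length_take, List.length_drop] at hl
    have h2j : (t.length : Int) + i = 2 * j := by omega
    refine ⟨?_, ?_⟩
    · rw [PySem.Int.mod_eq_zero_iff_dvd]; exact ⟨j, h2j⟩
    · symm; rw [PySem.Int.floordiv_eq_iff_of_pos (by omega)]; omega

theorem pv_main (s : String) : solution s = solution_alt s := by
  simp only [solution, solution_alt]
  apply PySem.List.foldl_congr_mem
  intro acc i hi
  rw [PySem.List.mem_pyRange_one] at hi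
  obtain ⟨h1, h2⟩ := hi
  set t := s.toList with ht
  set n : Int := (t.length : Int) with hn
  rw [PySem.List.foldl_add]
  rw [PySem.List.sum_map_ite_one_zero'
    (p := fun j => (PySem.List.slice t (some 0) (some i) ++ PySem.List.slice t (some i) (some j)
        ≠ PySem.List.slice t (some i) (some j) ++ PySem.List.slice t (some j) (some n))
      ∧ (PySem.List.slice t (some i) (some j) ++ PySem.List.slice t (some j) (some n)
        ≠ PySem.List.slice t (some j) (some n) ++ PySem.List.slice t (some 0) (some i))
      ∧ (PySem.List.slice t (some 0) (some i) ++ PySem.List.slice t (some i) (some j)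
        ≠ PySem.List.slice t (some j) (some n) ++ PySem.List.slice t (some 0) (some i)))]
  rw [PySem.List.foldl_ite_add_one
    (p := fun j => i < j ∧ j < n ∧ (PySem.List.slice t none (some j) = PySem.List.slice t (some i) none
      ∨ PySem.List.slice t (some i) none
          = PySem.List.slice t (some j) none ++ PySem.List.slice t none (some i)
      ∨ PySem.List.slice t none (some j)
          = PySem.List.slice t (some j) none ++ PySem.List.slice t none (some i)))]
  have hcongr : (PySem.List.pyRange (i + 1) n 1).countP
      (fun j => decide ((PySem.List.slice t (some 0) (some i) ++ PySem.List.slice t (some i) (some j)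
        ≠ PySem.List.slice t (some i) (some j) ++ PySem.List.slice t (some j) (some n))
      ∧ (PySem.List.slice t (some i) (some j) ++ PySem.List.slice t (some j) (some n)
        ≠ PySem.List.slice t (some j) (some n) ++ PySem.List.slice t (some 0) (some i))
      ∧ (PySem.List.slice t (some 0) (some i) ++ PySem.List.slice t (some i) (some j)
        ≠ PySem.List.slice t (some j) (some n) ++ PySem.List.slice t (some 0) (some i))))
      = (PySem.List.pyRange (i + 1) n 1).countP (fun j => !decide (PySem.List.slice t none (some j) = PySem.List.slice t (some i) none
      ∨ PySem.List.slice t (some i) none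
          = PySem.List.slice t (some j) none ++ PySem.List.slice t none (some i)
      ∨ PySem.List.slice t none (some j)
          = PySem.List.slice t (some j) none ++ PySem.List.slice t none (some i))) := by
    apply List.countP_congr
    intro j hjm
    rw [PySem.List.mem_pyRange_one] at hjm
    have h0i : (0:Int) ≤ i := by omega
    have hij : i ≤ j := by omega
    have hjn : j ≤ n := by omega
    rw [pv_slice_ab t i j h0i hij, pv_slice_bc t i j h0i hij, pv_slice_c t j (by omega),
        PySem.List.slice_zero_start]
    have hiff : ((PySem.List.slice t none (some j) ≠ PySem.List.slice t (some i) none)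
        ∧ (PySem.List.slice t (some i) none
            ≠ PySem.List.slice t (some j) none ++ PySem.List.slice t none (some i))
        ∧ (PySem.List.slice t none (some j)
            ≠ PySem.List.slice t (some j) none ++ PySem.List.slice t none (some i)))
        ↔ ¬ (PySem.List.slice t none (some j) = PySem.List.slice t (some i) none
      ∨ PySem.List.slice t (some i) none
          = PySem.List.slice t (some j) none ++ PySem.List.slice t none (some i)
      ∨ PySem.List.slice t none (some j)
          = PySem.List.slice t (some j) none ++ PySem.List.slice t none (some i)) := by
      tauto
    rw [decide_eq_decide.mpr hiff, decide_not]
  rw [hcongr]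
  set cands := (if PySem.Int.mod (n + i) 2 = 0 then
      PySem.Set.add (PySem.Set.ofList [n - i, 2 * i]) (PySem.Int.floordiv (n + i) 2)
    else PySem.Set.ofList [n - i, 2 * i]) with hcands
  have hnd : cands.Nodup := by
    rw [hcands]; split_ifs
    · exact PySem.Set.nodup_add _ _ (PySem.Set.nodup_ofList _)
    · exact PySem.Set.nodup_ofList _
  have hmemc : ∀ j : Int, j ∈ cands ↔ j = n - i ∨ j = 2 * i ∨
      (PySem.Int.mod (n + i) 2 = 0 ∧ j = PySem.Int.floordiv (n + i) 2) := by
    intro j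
    rw [hcands]; split_ifs with hpar
    · simp only [PySem.Set.mem_add, PySem.Set.mem_ofList, List.mem_cons,
        List.mem_singleton, List.not_mem_nil]
      tauto
    · simp only [PySem.Set.mem_ofList, List.mem_cons, List.not_mem_nil]
      tauto
  have hq : (PySem.List.pyRange (i + 1) n 1).countP (fun j => decide (PySem.List.slice t none (some j) = PySem.List.slice t (some i) none
      ∨ PySem.List.slice t (some i) none
          = PySem.List.slice t (some j) none ++ PySem.List.slice t none (some i)
      ∨ PySem.List.slice t none (some j)
          = PySem.List.slice t (some j) none ++ PySem.List.slice t none (some i)))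
      = cands.countP (fun j => decide (i < j ∧ j < n ∧ (PySem.List.slice t none (some j) = PySem.List.slice t (some i) none
      ∨ PySem.List.slice t (some i) none
          = PySem.List.slice t (some j) none ++ PySem.List.slice t none (some i)
      ∨ PySem.List.slice t none (some j)
          = PySem.List.slice t (some j) none ++ PySem.List.slice t none (some i)))) := by
    rw [List.countP_eq_length_filter, List.countP_eq_length_filter]
    refine List.Perm.length_eq ?_
    refine (List.perm_ext_iff_of_nodup ((PySem.List.nodup_pyRange_one _ _).filter _)
      (hnd.filter _)).mpr ?_
    intro j
    simp only [List.mem_filter, PySem.List.mem_pyRange_one, decide_eq_true_eq]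
    constructor
    · rintro ⟨⟨hlo, hhi⟩, hc⟩
      refine ⟨(hmemc j).mpr (pv_chk_pins t i j h1 (by omega) hhi hc), by omega, hhi, hc⟩
    · rintro ⟨_, hlo, hhi, hc⟩
      exact ⟨⟨by omega, hhi⟩, hc⟩
  have hsplit := List.length_eq_countP_add_countP (l := PySem.List.pyRange (i + 1) n 1)
    (fun j => decide (PySem.List.slice t none (some j) = PySem.List.slice t (some i) none
      ∨ PySem.List.slice t (some i) none
          = PySem.List.slice t (some j) none ++ PySem.List.slice t none (some i)
      ∨ PySem.List.slice t none (some j)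
          = PySem.List.slice t (some j) none ++ PySem.List.slice t none (some i)))
  have hlen : (PySem.List.pyRange (i + 1) n 1).length = (n - (i + 1)).toNat :=
    PySem.List.length_pyRange_one _ _
  rw [hq] at hsplit
  simp only [decide_eq_true_eq, decide_not] at hsplit
  omega

-- ===== VERDICT (by name: the statement is the Claim_ definition above) =====
theorem solution_spec : Claim_equal_solution := by
  intro s _
  show solution s = solution_alt s
  exact pv_main s
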